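-- pv_equiv track=rewrite | github.com/Steven-Ajex/Skills | fmt/_meta/scripts/refresh_atomic_skill_contracts.py | remove_inserted_contract_blocks
-- ===== SOURCE A (Python) =====
-- def remove_inserted_contract_blocks(lines: list[str]) -> list[str]:
--     keywords = (
--         "First-Principles Task Definition",
--         "Artifact Handoff",
--         "Quality Gates",
--         "Failure / Fallback",
--     )
--     out: list[str] = []
--     i = 0
--     while i < len(lines):
--         line = lines[i]
--         if line.startswith("## ") and any(k in line for k in keywords):
--             i += 1
--             while i < len(lines) and not lines[i].startswith("## "):
--                 i += 1
--             continue
--         out.append(line)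
--         i += 1
--     return out
-- ===== SOURCE B (Python) =====
-- def remove_inserted_contract_blocks(lines: list[str]) -> list[str]:
--     keywords = (
--         "First-Principles Task Definition",
--         "Artifact Handoff",
--         "Quality Gates",
--         "Failure / Fallback",
--     )
--     out: list[str] = []
--     skipping = False
--     for line in lines:
--         if line.startswith("## "):
--             skipping = any(k in line for k in keywords)
--         if not skipping:
--             out.append(line)
--     return out
-- ===== Notes on version B (the rewrite author's own statement) =====
-- stated objective: simpler
-- what changed: Replaces the index-driven outer/inner while loops with one flat for-loop over the lines and a boolean skipping flag re-decided at each '## ' header; skipped lines are passed over in the single loop instead of an inner index-advancing scan.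
import Mathlib
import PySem

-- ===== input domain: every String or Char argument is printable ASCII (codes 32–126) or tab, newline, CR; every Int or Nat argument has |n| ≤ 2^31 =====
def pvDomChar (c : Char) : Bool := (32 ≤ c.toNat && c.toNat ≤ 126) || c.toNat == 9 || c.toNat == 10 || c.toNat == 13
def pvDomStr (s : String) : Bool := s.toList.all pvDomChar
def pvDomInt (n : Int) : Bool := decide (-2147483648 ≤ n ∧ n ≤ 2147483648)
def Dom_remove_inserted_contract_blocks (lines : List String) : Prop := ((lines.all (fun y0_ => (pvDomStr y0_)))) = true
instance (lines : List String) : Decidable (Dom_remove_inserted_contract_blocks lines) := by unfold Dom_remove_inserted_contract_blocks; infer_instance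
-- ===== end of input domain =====

-- ===== PORT A =====
-- B replaces A's index-driven outer/inner while loops with one flat pass and a boolean skipping flag (objective: simpler).
-- any(k in line for k in keywords)
def pvAnyKw (line : String) : Bool :=
  (["First-Principles Task Definition", "Artifact Handoff", "Quality Gates",
    "Failure / Fallback"]).any (fun k => PySem.Str.isIn k line)

-- inner 'while i < len(lines) and not lines[i].startswith("## "): i += 1' (returns the remaining suffix)
def pvSkipA : List String → List String
  | [] => []
  | l :: rest => if PySem.Str.startswith l "## " then l :: rest else pvSkipA rest

theorem pvSkipA_length_le (xs : List String) : (pvSkipA xs).length ≤ xs.length := by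
  induction xs with
  | nil => simp [pvSkipA]
  | cons l rest ih =>
    simp only [pvSkipA]
    split
    · simp
    · exact Nat.le_trans ih (Nat.le_succ _)

-- outer 'while i < len(lines)'
def pvLoopA : List String → List String
  | [] => []
  | line :: rest =>
    if PySem.Str.startswith line "## " && pvAnyKw line then pvLoopA (pvSkipA rest)
    else line :: pvLoopA rest
termination_by l => l.length
decreasing_by
  · exact Nat.lt_succ_of_le (pvSkipA_length_le rest)
  · simp

def remove_inserted_contract_blocks (lines : List String) : List String := pvLoopA lines

-- ===== PORT B =====
-- 'for line in lines' with the skipping flag re-decided at each '## ' header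
def pvLoopB : Bool → List String → List String
  | _, [] => []
  | skipping, line :: rest =>
    let s := if PySem.Str.startswith line "## " then pvAnyKw line else skipping
    if s then pvLoopB s rest else line :: pvLoopB s rest

def remove_inserted_contract_blocks_alt (lines : List String) : List String := pvLoopB false lines

-- ===== PRECONDITION & SPEC =====
def Spec_remove_inserted_contract_blocks (lines : List String) (out : List String) : Prop := out = remove_inserted_contract_blocks_alt lines
instance (lines : List String) (out : List String) : Decidable (Spec_remove_inserted_contract_blocks lines out) := by unfold Spec_remove_inserted_contract_blocks; infer_instance

-- ===== CLAIM (what is proved, stated in full; the proofs are below) =====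
def Claim_equal_remove_inserted_contract_blocks : Prop := ∀ (lines : List String), Dom_remove_inserted_contract_blocks lines → Spec_remove_inserted_contract_blocks lines (remove_inserted_contract_blocks lines)

-- ===== LEMMAS AND PROOFS =====
theorem pvLoop_agree (lines : List String) :
    pvLoopA lines = pvLoopB false lines ∧ pvLoopA (pvSkipA lines) = pvLoopB true lines := by
  induction lines with
  | nil => simp [pvLoopA, pvLoopB, pvSkipA]
  | cons l rest ih =>
    by_cases hh : PySem.Str.startswith l "## " = true
    all_goals simp only [PySem.Str.startswith_eq, show ("## ".toList) = [Char.ofNat 35, Char.ofNat 35, Char.ofNat 32] from rfl] at hh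
    · by_cases hk : pvAnyKw l = true
      · constructor <;> simp [pvLoopA, pvLoopB, pvSkipA, hh, hk, ih.2]
      · rw [Bool.not_eq_true] at hk
        constructor <;> simp [pvLoopA, pvLoopB, pvSkipA, hh, hk, ih.1]
    · rw [Bool.not_eq_true] at hh
      constructor <;> simp [pvLoopA, pvLoopB, pvSkipA, hh, ih.1, ih.2]

-- ===== VERDICT (by name: the statement is the Claim_ definition above) =====
theorem remove_inserted_contract_blocks_spec : Claim_equal_remove_inserted_contract_blocks := by
  intro lines _
  unfold Spec_remove_inserted_contract_blocks remove_inserted_contract_blocks remove_inserted_contract_blocks_alt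
  exact (pvLoop_agree lines).1
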